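-- pv_equiv track=rewrite | github.com/Jkker/basic-algo | Chapter 11 - DP/min_square_sum.py | min_square_sum2
-- ===== SOURCE A (Python) =====
-- def min_square_sum2(A):
--     lookup = [None] * (len(A) + 1)
--
--     def recur(i):
--         if i == len(A) + 1:
--             return 0
--         elif lookup[i] is not None:
--             return lookup[i]
--         else:
--             min_sum = float('inf')
--             for k in range(i, len(A) + 1):
--                 curr_sum = pow(sum(A[i:k + 1]), 2) + recur(k + 1)
--                 if curr_sum < min_sum:
--                     min_sum = curr_sum
--             lookup[i] = min_sum
--             return min_sum
--
--     return recur(1)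
-- ===== SOURCE B (Python) =====
-- def min_square_sum2(A):
--     n = len(A)
--     if n == 0:
--         return 0
--     pre = [0] * (n + 1)
--     for j in range(n):
--         pre[j + 1] = pre[j] + A[j]
--     dp = [0] * (n + 1)
--     for i in range(n - 1, 0, -1):
--         best = None
--         for k in range(i, n):
--             c = (pre[k + 1] - pre[i]) ** 2 + dp[k + 1]
--             if best is None or c < best:
--                 best = c
--         dp[i] = best
--     return dp[1]
-- ===== Notes on version B (the rewrite author's own statement) =====
-- stated objective: faster
-- what changed: A's memoized top-down recursion that re-sums every slice A[i:k+1] inside the DP transition is replaced by a bottom-up DP over a precomputed prefix-sum array, making each segment sum O(1).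
import Mathlib
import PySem

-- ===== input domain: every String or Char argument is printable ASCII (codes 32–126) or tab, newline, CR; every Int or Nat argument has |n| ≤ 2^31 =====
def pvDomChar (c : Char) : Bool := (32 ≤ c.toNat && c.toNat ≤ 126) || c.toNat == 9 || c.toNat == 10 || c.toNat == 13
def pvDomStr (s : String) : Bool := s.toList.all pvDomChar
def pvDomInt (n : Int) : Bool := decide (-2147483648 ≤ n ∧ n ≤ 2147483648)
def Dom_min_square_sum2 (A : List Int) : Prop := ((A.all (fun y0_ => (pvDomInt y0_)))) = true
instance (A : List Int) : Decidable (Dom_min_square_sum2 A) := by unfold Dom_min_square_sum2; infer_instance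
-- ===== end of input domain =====

-- B replaces A's memoized top-down recursion (which re-sums every slice) by a bottom-up
-- DP over prefix sums: O(n^2) instead of O(n^3); return values are identical.


-- ===== PORT A =====
-- 'min_sum < curr'-style comparison against float('inf'): none plays inf
def pvOptLt : Option Int → Option Int → Bool
  | some a, some b => decide (a < b)
  | some _, none => true
  | none, _ => false

-- recur(i) with the memo table 'lookup' threaded through; fuel is only a totality
-- guard (the supplied fuel always suffices, the 0 branch is unreachable)
def msqRecur (A : List Int) : Nat → Nat → List (Option Int) → Option Int × List (Option Int)
  | 0, _, lk => (none, lk)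
  | fuel+1, i, lk =>
    if i = A.length + 1 then (some 0, lk)
    else
      match lk.getD i none with
      | some v => (some v, lk)
      | none =>
        let r := (List.range' i (A.length + 1 - i)).foldl
          (fun (st : Option Int × List (Option Int)) k =>
            let res := msqRecur A fuel (k+1) st.2
            let curr := res.1.map (fun v => (PySem.List.slice A (some (i : Int)) (some ((k : Int) + 1))).sum ^ 2 + v)
            (if pvOptLt curr st.1 then curr else st.1, res.2))
          ((none : Option Int), lk)
        (r.1, r.2.set i r.1)

def min_square_sum2 (A : List Int) : Int :=
  ((msqRecur A (A.length + 2) 1 (List.replicate (A.length + 1) (none : Option Int))).1).getD 0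
  -- .getD 0 is unreachable: with fuel = len+2 the recursion always returns some value

-- ===== PORT B =====
-- pre[j+1] = pre[j] + A[j]
def pvPreAux : List Int → Int → List Int
  | [], _ => []
  | x :: xs, s => (s + x) :: pvPreAux xs (s + x)

def pvPre (A : List Int) : List Int := 0 :: pvPreAux A 0

-- 'if best is None or c < best: best = c'
def pvMinF : Option Int → Int → Option Int
  | none, c => some c
  | some b, c => if c < b then some c else some b

-- the inner 'for k in range(i, n)' loop
def pvRow (pre dp : List Int) (i : Nat) (ks : List Nat) : Option Int :=
  ks.foldl (fun best k => pvMinF best ((pre.getD (k+1) 0 - pre.getD i 0) ^ 2 + dp.getD (k+1) 0)) none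

-- the outer 'for i in range(n-1, 0, -1)' loop (argument counts down to 1)
def pvLoop (pre : List Int) (n : Nat) : Nat → List Int → List Int
  | 0, dp => dp
  | i+1, dp =>
      pvLoop pre n i (dp.set (i+1) ((pvRow pre dp (i+1) (List.range' (i+1) (n - (i+1)))).getD 0))
      -- .getD 0 unreachable: the inner range is nonempty for every i+1 ≤ n-1

def min_square_sum2_alt (A : List Int) : Int :=
  if A.length = 0 then 0
  else (pvLoop (pvPre A) A.length (A.length - 1) (List.replicate (A.length + 1) (0 : Int))).getD 1 0

-- ===== PRECONDITION & SPEC =====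
def Spec_min_square_sum2 (A : List Int) (out : Int) : Prop := out = min_square_sum2_alt A
instance (A : List Int) (out : Int) : Decidable (Spec_min_square_sum2 A out) := by unfold Spec_min_square_sum2; infer_instance

-- ===== CLAIM (what is proved, stated in full; the proofs are below) =====
def Claim_equal_min_square_sum2 : Prop := ∀ (A : List Int), Dom_min_square_sum2 A → Spec_min_square_sum2 A (min_square_sum2 A)

-- ===== LEMMAS AND PROOFS =====

-- prefix sums: S A j = sum of the first j elements
def pvS (A : List Int) (j : Nat) : Int := (A.take j).sum

-- B's final dp array, read with getD (out of range = 0)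
def pvDval (A : List Int) (j : Nat) : Int :=
  (pvLoop (pvPre A) A.length (A.length - 1) (List.replicate (A.length + 1) (0 : Int))).getD j 0

theorem pvPreAux_getD (A : List Int) : ∀ (s : Int) (j : Nat), j < A.length →
    (pvPreAux A s).getD j 0 = s + (A.take (j+1)).sum := by
  induction A with
  | nil => intro s j h; simp at h
  | cons x xs ih =>
      intro s j h
      cases j with
      | zero => simp [pvPreAux]
      | succ j =>
          simp only [pvPreAux, List.getD_cons_succ]
          rw [ih (s + x) j (by simpa using h)]
          simp [List.take_succ_cons, add_assoc]

theorem pvPre_getD (A : List Int) (j : Nat) (h : j ≤ A.length) :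
    (pvPre A).getD j 0 = pvS A j := by
  cases j with
  | zero => simp [pvPre, pvS]
  | succ j => simpa [pvPre, pvS] using pvPreAux_getD A 0 j (by omega)

theorem pvMinF_some (b c : Int) : pvMinF (some b) c = some (min b c) := by
  by_cases h : c < b <;> simp [pvMinF, h, min_def]

theorem foldl_pvMinF_some (l : List Int) : ∀ b : Int,
    l.foldl pvMinF (some b) = some (l.foldl min b) := by
  induction l with
  | nil => intro b; rfl
  | cons c l ih => intro b; simp only [List.foldl_cons, pvMinF_some]; exact ih _

theorem foldl_min_le_init (l : List Int) : ∀ b : Int, l.foldl min b ≤ b := by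
  induction l with
  | nil => intro b; simp
  | cons c l ih => intro b; exact le_trans (ih _) (min_le_left _ _)

theorem foldl_min_le_mem (l : List Int) : ∀ (b y : Int), y ∈ l → l.foldl min b ≤ y := by
  induction l with
  | nil => intro b y h; simp at h
  | cons c l ih =>
      intro b y h
      rcases List.mem_cons.1 h with h | h
      · subst h; exact le_trans (foldl_min_le_init l _) (min_le_right _ _)
      · exact ih _ _ h

theorem pvRow_congr (pre : List Int) (i : Nat) (ks : List Nat) (dp dp' : List Int)
    (h : ∀ k ∈ ks, dp.getD (k+1) 0 = dp'.getD (k+1) 0) :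
    pvRow pre dp i ks = pvRow pre dp' i ks := by
  unfold pvRow
  refine PySem.List.foldl_congr_mem _ _ _ _ (fun acc k hk => ?_)
  rw [h k hk]

-- pvLoop does not touch entries at index 0 or above its counter
theorem pvLoop_getD_high (pre : List Int) (n : Nat) : ∀ (i : Nat) (dp : List Int) (j : Nat),
    (j = 0 ∨ i < j) → (pvLoop pre n i dp).getD j 0 = dp.getD j 0 := by
  intro i
  induction i with
  | zero => intro dp j _; rfl
  | succ i ih =>
      intro dp j hj
      simp only [pvLoop]
      rw [ih _ j (by omega)]
      simp only [List.getD, List.getElem?_set]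
      rw [if_neg (by omega)]

-- solved entries of the loop satisfy the row recurrence read off the FINAL array
theorem pvLoop_getD_mid (pre : List Int) (n : Nat) : ∀ (i : Nat) (dp : List Int),
    dp.length = n + 1 → i ≤ n - 1 → ∀ j, 1 ≤ j → j ≤ i →
    (pvLoop pre n i dp).getD j 0
      = (pvRow pre (pvLoop pre n i dp) j (List.range' j (n - j))).getD 0 := by
  intro i
  induction i with
  | zero => intro dp _ _ j h1 h2; omega
  | succ i ih =>
      intro dp hlen hi j h1 h2
      simp only [pvLoop]
      set b := (pvRow pre dp (i+1) (List.range' (i+1) (n - (i+1)))).getD 0 with hb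
      rcases Nat.lt_or_ge j (i+1) with hj | hj
      · exact ih (dp.set (i+1) b) (by simp [hlen]) (by omega) j h1 (by omega)
      · obtain rfl : j = i + 1 := by omega
        rw [pvLoop_getD_high pre n i (dp.set (i+1) b) (i+1) (Or.inr (by omega))]
        have hset : (dp.set (i+1) b).getD (i+1) 0 = b := by
          simp only [List.getD, List.getElem?_set, if_pos trivial]
          rw [if_pos (by omega : i + 1 < dp.length)]
          rfl
        rw [hset, hb]
        congr 1
        apply pvRow_congr
        intro k hk
        have hkb := List.mem_range'_1.1 hk
        rw [pvLoop_getD_high pre n i (dp.set (i+1) b) (k+1) (Or.inr (by omega))]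
        simp only [List.getD, List.getElem?_set]
        rw [if_neg (by omega)]

theorem pvDval_zero (A : List Int) (j : Nat) (h : j = 0 ∨ A.length ≤ j) : pvDval A j = 0 := by
  unfold pvDval
  rw [pvLoop_getD_high (pvPre A) A.length (A.length - 1) _ j (by omega)]
  rcases Nat.lt_or_ge j (A.length + 1) with hj | hj
  · simp [List.getD, hj]
  · simp [List.getD, Nat.not_lt.2 hj]

theorem pvDval_rec (A : List Int) (j : Nat) (h1 : 1 ≤ j) (h2 : j ≤ A.length - 1) :
    pvDval A j
      = ((List.range' j (A.length - j)).foldl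
          (fun best k => pvMinF best ((pvS A (k+1) - pvS A j) ^ 2 + pvDval A (k+1))) none).getD 0 := by
  have h := pvLoop_getD_mid (pvPre A) A.length (A.length - 1)
      (List.replicate (A.length + 1) (0 : Int)) (by simp) (le_refl _) j h1 h2
  unfold pvDval
  rw [h]
  congr 1
  unfold pvRow
  refine PySem.List.foldl_congr_mem _ _ _ _ (fun acc k hk => ?_)
  have hkb := List.mem_range'_1.1 hk
  rw [pvPre_getD A (k+1) (by omega), pvPre_getD A j (by omega)]

-- the value A's loop adds for segment A[i:k+1]
def pvTermA (A : List Int) (i k : Nat) : Int :=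
  (PySem.List.slice A (some (i : Int)) (some ((k : Int) + 1))).sum ^ 2 + pvDval A (k+1)

theorem slice_sum (A : List Int) (i k : Nat) (h : i ≤ k + 1) :
    (PySem.List.slice A (some (i : Int)) (some ((k : Int) + 1))).sum = pvS A (k+1) - pvS A i := by
  have hc : ((k : Int) + 1) = ((k + 1 : Nat) : Int) := by push_cast; ring
  rw [hc, PySem.List.slice_natCast]
  have hadd := List.take_add (l := A) (i := i) (j := k+1-i)
  rw [show i + (k+1-i) = k+1 from by omega] at hadd
  unfold pvS
  rw [hadd, List.sum_append]
  ring

-- memo-table invariant: every cached value is the dp value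
def pvInv (A : List Int) (lk : List (Option Int)) : Prop :=
  ∀ j v, lk.getD j none = some v → v = pvDval A j

-- A's inner minimum equals B's dp value
theorem pvMinEq (A : List Int) (i : Nat) (h1 : 1 ≤ i) (h2 : i ≤ A.length) :
    ((List.range' i (A.length + 1 - i)).map (pvTermA A i)).foldl pvMinF none
      = some (pvDval A i) := by
  rcases Nat.lt_or_ge i A.length with hlt | hge
  · -- 1 ≤ i ≤ n-1 : nonempty inner range plus the duplicate last term k = n
    have hsplit : A.length + 1 - i = (A.length - i) + 1 := by omega
    have hcat : List.range' i (A.length + 1 - i)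
        = List.range' i (A.length - i) ++ [A.length] := by
      rw [hsplit, List.range'_1_concat]
      congr 2
      omega
    have hcons : List.range' i (A.length - i) = i :: List.range' (i+1) (A.length - i - 1) := by
      rw [show A.length - i = (A.length - i - 1) + 1 from by omega, List.range'_succ]
      norm_num
    -- the extra term repeats the k = n-1 term
    have hdup : pvTermA A i A.length = pvTermA A i (A.length - 1) := by
      unfold pvTermA
      rw [slice_sum A i A.length (by omega), slice_sum A i (A.length - 1) (by omega)]
      rw [pvDval_zero A (A.length + 1) (by omega), pvDval_zero A (A.length - 1 + 1) (by omega)]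
      have hS : pvS A (A.length + 1) = pvS A (A.length - 1 + 1) := by
        unfold pvS
        rw [List.take_of_length_le (by omega), List.take_of_length_le (by omega)]
      rw [hS]
    -- the B-side minimum
    have hrec := pvDval_rec A i h1 (by omega)
    have hfold : (List.range' i (A.length - i)).foldl
        (fun best k => pvMinF best ((pvS A (k+1) - pvS A i) ^ 2 + pvDval A (k+1))) none
        = ((List.range' i (A.length - i)).map (pvTermA A i)).foldl pvMinF none := by
      rw [List.foldl_map]
      refine PySem.List.foldl_congr_mem _ _ _ _ (fun acc k hk => ?_)
      have hkb := List.mem_range'_1.1 hk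
      unfold pvTermA
      rw [slice_sum A i k (by omega)]
    set M := (pvTermA A i (A.length - 1))
    have hmin : ((List.range' i (A.length - i)).map (pvTermA A i)).foldl pvMinF none
        = some ((List.range' (i+1) (A.length - i - 1)).foldl
            (fun m k => min m (pvTermA A i k)) (pvTermA A i i)) := by
      rw [hcons]
      simp only [List.map_cons, List.foldl_cons, pvMinF]
      rw [foldl_pvMinF_some, List.foldl_map]
    set m0 := (List.range' (i+1) (A.length - i - 1)).foldl
        (fun m k => min m (pvTermA A i k)) (pvTermA A i i) with hm0
    have hle : m0 ≤ pvTermA A i (A.length - 1) := by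
      rcases Nat.lt_or_ge i (A.length - 1) with hi2 | hi2
      · have hmem : pvTermA A i (A.length - 1)
            ∈ (List.range' (i+1) (A.length - i - 1)).map (pvTermA A i) := by
          exact List.mem_map_of_mem (List.mem_range'_1.2 (by omega))
        rw [hm0, ← List.foldl_map]
        exact foldl_min_le_mem _ _ _ hmem
      · have : A.length - 1 = i := by omega
        rw [this, hm0, ← List.foldl_map]
        exact foldl_min_le_init _ _
    -- assemble
    rw [hcat, List.map_append, List.foldl_append, hmin]
    simp only [List.map_cons, List.map_nil, List.foldl_cons, List.foldl_nil]
    rw [pvMinF_some, hdup, min_eq_left hle]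
    -- identify with pvDval
    rw [hrec, hfold, hmin]
    rfl
  · -- i = n : the single k = n term, value 0
    obtain rfl : i = A.length := by omega
    rw [show A.length + 1 - A.length = 1 from by omega]
    simp only [List.range'_one, List.map_cons, List.map_nil, List.foldl_cons, List.foldl_nil, pvMinF]
    unfold pvTermA
    rw [slice_sum A A.length A.length (by omega)]
    rw [pvDval_zero A (A.length + 1) (by omega), pvDval_zero A A.length (by omega)]
    have : pvS A (A.length + 1) = pvS A A.length := by
      unfold pvS
      rw [List.take_of_length_le (by omega), List.take_of_length_le (by omega)]
    rw [this]
    ring_nf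

theorem msqRecur_main (A : List Int) : ∀ (fuel i : Nat) (lk : List (Option Int)),
    1 ≤ i → i ≤ A.length + 1 → A.length + 2 - i ≤ fuel → pvInv A lk →
    (msqRecur A fuel i lk).1 = some (pvDval A i) ∧ pvInv A (msqRecur A fuel i lk).2 := by
  intro fuel
  induction fuel with
  | zero => intro i lk h1 h2 hf _; omega
  | succ fuel ih =>
      intro i lk h1 h2 hf hinv
      by_cases hbase : i = A.length + 1
      · subst hbase
        simp only [msqRecur]
        simp only [if_true]
        exact ⟨by rw [pvDval_zero A (A.length + 1) (by omega)], hinv⟩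
      · have hin : i ≤ A.length := by omega
        cases hcache : lk.getD i none with
        | some v =>
            simp only [msqRecur, if_neg hbase, hcache]
            exact ⟨by rw [hinv i v hcache], hinv⟩
        | none =>
            -- the inner fold: every step takes the min with one pvTermA value
            have inner : ∀ (ks : List Nat), (∀ k ∈ ks, i ≤ k ∧ k ≤ A.length) →
                ∀ (st : Option Int × List (Option Int)), pvInv A st.2 →
                (ks.foldl
                  (fun (st : Option Int × List (Option Int)) k =>
                    let res := msqRecur A fuel (k+1) st.2
                    let curr := res.1.map (fun v => (PySem.List.slice A (some (i : Int)) (some ((k : Int) + 1))).sum ^ 2 + v)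
                    (if pvOptLt curr st.1 then curr else st.1, res.2)) st).1
                  = (ks.map (pvTermA A i)).foldl pvMinF st.1
                ∧ pvInv A (ks.foldl
                  (fun (st : Option Int × List (Option Int)) k =>
                    let res := msqRecur A fuel (k+1) st.2
                    let curr := res.1.map (fun v => (PySem.List.slice A (some (i : Int)) (some ((k : Int) + 1))).sum ^ 2 + v)
                    (if pvOptLt curr st.1 then curr else st.1, res.2)) st).2 := by
              intro ks
              induction ks with
              | nil => intro _ st hst; exact ⟨rfl, hst⟩
              | cons k ks ihk =>
                  intro hks st hst
                  obtain ⟨hik, hkn⟩ := hks k (by simp)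
                  have hrec := ih (k+1) st.2 (by omega) (by omega) (by omega) hst
                  simp only [List.foldl_cons, List.map_cons]
                  have hstep :
                      (let res := msqRecur A fuel (k+1) st.2
                       let curr := res.1.map (fun v => (PySem.List.slice A (some (i : Int)) (some ((k : Int) + 1))).sum ^ 2 + v)
                       ((if pvOptLt curr st.1 then curr else st.1 : Option Int), res.2))
                      = (pvMinF st.1 (pvTermA A i k), (msqRecur A fuel (k+1) st.2).2) := by
                    simp only [hrec.1]
                    have hterm : (Option.some (pvDval A (k+1))).map
                        (fun v => (PySem.List.slice A (some (i : Int)) (some ((k : Int) + 1))).sum ^ 2 + v)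
                        = some (pvTermA A i k) := by
                      simp [pvTermA]
                    rw [hterm]
                    cases hst1 : st.1 with
                    | none => simp [pvOptLt, pvMinF]
                    | some b =>
                        by_cases hlt : pvTermA A i k < b
                        · simp [pvOptLt, pvMinF, hlt]
                        · simp [pvOptLt, pvMinF, hlt]
                  rw [hstep]
                  exact ihk (fun k' hk' => hks k' (by simp [hk'])) _ hrec.2
            have hbounds : ∀ k ∈ List.range' i (A.length + 1 - i), i ≤ k ∧ k ≤ A.length := by
              intro k hk
              have := List.mem_range'_1.1 hk
              omega
            have hfold := inner (List.range' i (A.length + 1 - i)) hbounds ((none : Option Int), lk) hinv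
            have hval : ((List.range' i (A.length + 1 - i)).foldl
                (fun (st : Option Int × List (Option Int)) k =>
                  let res := msqRecur A fuel (k+1) st.2
                  let curr := res.1.map (fun v => (PySem.List.slice A (some (i : Int)) (some ((k : Int) + 1))).sum ^ 2 + v)
                  (if pvOptLt curr st.1 then curr else st.1, res.2)) ((none : Option Int), lk)).1
                = some (pvDval A i) := by
              rw [hfold.1]
              exact pvMinEq A i h1 hin
            simp only [msqRecur, if_neg hbase, hcache]
            refine ⟨hval, ?_⟩
            -- the final lookup write caches exactly the dp value
            intro j v hj
            rcases eq_or_ne i j with rfl | hne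
            · rw [List.getD_eq_getElem?_getD, List.getElem?_set] at hj
              simp only [if_true] at hj
              split at hj
              · rw [hval] at hj
                simp only [Option.getD_some, Option.some.injEq] at hj
                omega
              · simp at hj
            · rw [List.getD_eq_getElem?_getD, List.getElem?_set, if_neg hne] at hj
              exact hfold.2 j v (by rw [List.getD_eq_getElem?_getD]; exact hj)

-- ===== VERDICT (by name: the statement is the Claim_ definition above) =====
theorem min_square_sum2_spec : Claim_equal_min_square_sum2 := by
  intro A _
  unfold Spec_min_square_sum2 min_square_sum2 min_square_sum2_alt
  have hinv : pvInv A (List.replicate (A.length + 1) (none : Option Int)) := by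
    intro j v hv
    rcases Nat.lt_or_ge j (A.length + 1) with hj | hj <;>
      simp [List.getD_eq_getElem?_getD, hj, Nat.not_lt.2] at hv
  have h := msqRecur_main A (A.length + 2) 1 _ (by omega) (by omega) (by omega) hinv
  rw [h.1]
  by_cases hn : A.length = 0
  · rw [if_pos hn, pvDval_zero A 1 (by omega)]
    rfl
  · rw [if_neg hn]
    rfl
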